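-- pv_equiv track=rewrite | github.com/DarKoul-Wmg/AMS-AWS-1 | MP03 Programación/UF2_Python dineño modular/Ejercicios/PT25_recursividad2/ex_clase_jordi2.py | unionsinrep
-- ===== SOURCE A (Python) =====
-- def unionsinrep(string1,string2):
--     resultado = ""
--
--     if len(string1) == 0 and len(string2) == 0:
--         return resultado
--
--     elif len(string1) == 0 and len(string2) !=0:
--         resultado = unionsinrep(string1,string2[1:])
--
--     elif len(string1) != 0 and len(string2) ==0:
--         resultado = unionsinrep(string1[1:],string2)
--     else:
--         resultado = unionsinrep(string1[1:],string2[1:])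
--
--     if len(string1) > 0 and string1[0] not in resultado:
--         resultado += string1[0]
--
--     elif len(string2) > 0 and string2[0] not in resultado:
--         resultado += string2[0]
--
--     return resultado
-- ===== SOURCE B (Python) =====
-- def unionsinrep(string1, string2):
--     res = ""
--     for i in reversed(range(max(len(string1), len(string2)))):
--         if i < len(string1) and string1[i] not in res:
--             res += string1[i]
--         elif i < len(string2) and string2[i] not in res:
--             res += string2[i]
--     return res
-- ===== Notes on version B (the rewrite author's own statement) =====
-- stated objective: faster
-- what changed: Replaces A's four-way recursion on simultaneous head-slices (building the result on the unwind) with a single iterative descending-index loop over one growing result string, no recursion and no string slicing.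
import Mathlib
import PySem

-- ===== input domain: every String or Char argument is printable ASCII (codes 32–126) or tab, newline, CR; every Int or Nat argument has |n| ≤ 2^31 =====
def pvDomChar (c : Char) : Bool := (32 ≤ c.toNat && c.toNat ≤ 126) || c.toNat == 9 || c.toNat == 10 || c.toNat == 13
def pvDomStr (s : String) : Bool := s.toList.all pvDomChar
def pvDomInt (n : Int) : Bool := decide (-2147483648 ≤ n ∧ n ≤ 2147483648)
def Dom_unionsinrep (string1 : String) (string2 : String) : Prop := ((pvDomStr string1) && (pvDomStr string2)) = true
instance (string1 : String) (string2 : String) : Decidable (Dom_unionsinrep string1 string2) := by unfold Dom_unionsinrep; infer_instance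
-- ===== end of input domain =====

-- B replaces A's recursion on simultaneous head-slices with one iterative descending-index loop (alternative decomposition, same asymptotic cost).

-- ===== PORT A =====
-- Literal transliteration of A's recursion over the two strings as lists of chars
-- (Python strings are sequences of chars; s[1:] = drop 1, 'c not in r' = ¬ contains,
--  r += c = append at the end; all exact on this domain).
def pvUnionA (l1 l2 : List Char) : List Char :=
  if l1.length = 0 ∧ l2.length = 0 then []
  else
    let resultado :=
      if l1.length = 0 ∧ l2.length ≠ 0 then pvUnionA l1 (l2.drop 1)
      else if l1.length ≠ 0 ∧ l2.length = 0 then pvUnionA (l1.drop 1) l2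
      else pvUnionA (l1.drop 1) (l2.drop 1)
    if l1.length > 0 ∧ l1.getD 0 ' ' ∉ resultado then resultado ++ [l1.getD 0 ' ']
    else if l2.length > 0 ∧ l2.getD 0 ' ' ∉ resultado then resultado ++ [l2.getD 0 ' ']
    else resultado
termination_by l1.length + l2.length
decreasing_by
  all_goals simp only [List.length_drop] at *; omega

def unionsinrep (string1 : String) (string2 : String) : String :=
  String.mk (pvUnionA string1.toList string2.toList)

-- ===== PORT B =====
-- One loop step of Source B's for-loop body (i is an in-range index; string1[i] = getD i, exact since 0 ≤ i < length on every executed step).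
def pvStep (l1 l2 : List Char) (res : List Char) (i : Nat) : List Char :=
  if i < l1.length ∧ l1.getD i ' ' ∉ res then res ++ [l1.getD i ' ']
  else if i < l2.length ∧ l2.getD i ' ' ∉ res then res ++ [l2.getD i ' ']
  else res

-- Source B: res = ""; for i in reversed(range(max(len1,len2))): …; return res
def unionsinrep_alt (string1 : String) (string2 : String) : String :=
  let l1 := string1.toList
  let l2 := string2.toList
  String.mk (((List.range (max l1.length l2.length)).reverse).foldl (pvStep l1 l2) [])

-- ===== PRECONDITION & SPEC =====
def Spec_unionsinrep (string1 : String) (string2 : String) (out : String) : Prop := out = unionsinrep_alt string1 string2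
instance (string1 : String) (string2 : String) (out : String) : Decidable (Spec_unionsinrep string1 string2 out) := by unfold Spec_unionsinrep; infer_instance

-- ===== CLAIM (what is proved, stated in full; the proofs are below) =====
def Claim_equal_unionsinrep : Prop := ∀ (string1 : String) (string2 : String), Dom_unionsinrep string1 string2 → Spec_unionsinrep string1 string2 (unionsinrep string1 string2)

-- ===== LEMMAS AND PROOFS =====

-- shifting an index by one on the full lists = using the index on the tails
lemma pvStep_shift (l1 l2 res : List Char) (i : Nat) :
    pvStep l1 l2 res (i + 1) = pvStep (l1.drop 1) (l2.drop 1) res i := by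
  unfold pvStep
  cases l1 <;> cases l2 <;> simp

lemma pvKey : ∀ (n : Nat) (l1 l2 : List Char), max l1.length l2.length = n →
    pvUnionA l1 l2 = ((List.range n).reverse).foldl (pvStep l1 l2) [] := by
  intro n
  induction n with
  | zero =>
    intro l1 l2 h
    have h1 : l1 = [] := by cases l1 <;> simp_all
    have h2 : l2 = [] := by cases l2 <;> simp_all
    subst h1; subst h2
    simp [pvUnionA]
  | succ n ih =>
    intro l1 l2 h
    have hne : ¬ (l1.length = 0 ∧ l2.length = 0) := by omega
    have hmax : max (l1.drop 1).length (l2.drop 1).length = n := by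
      simp only [List.length_drop]; omega
    have hrec : pvUnionA l1 l2 =
        pvStep l1 l2 (pvUnionA (l1.drop 1) (l2.drop 1)) 0 := by
      rw [pvUnionA]
      rw [if_neg hne]
      have hr : (if l1.length = 0 ∧ l2.length ≠ 0 then pvUnionA l1 (l2.drop 1)
          else if l1.length ≠ 0 ∧ l2.length = 0 then pvUnionA (l1.drop 1) l2
          else pvUnionA (l1.drop 1) (l2.drop 1)) = pvUnionA (l1.drop 1) (l2.drop 1) := by
        split_ifs with h1 h2
        · have : l1 = [] := by cases l1 <;> simp_all
          rw [this]; rfl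
        · have : l2 = [] := by cases l2 <;> simp_all
          rw [this]; rfl
        · rfl
      rw [hr]
      rfl
    have hrange : (List.range (n + 1)).reverse
        = ((List.range n).reverse.map Nat.succ) ++ [0] := by
      rw [List.range_succ_eq_map]
      simp
    rw [hrec, hrange, List.foldl_append]
    have hfold : List.foldl (pvStep l1 l2) [] ((List.range n).reverse.map Nat.succ)
        = List.foldl (pvStep (l1.drop 1) (l2.drop 1)) [] (List.range n).reverse := by
      rw [List.foldl_map]
      exact PySem.List.foldl_congr_mem _ _ _ _ (fun acc x _ => pvStep_shift l1 l2 acc x)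
    simp only [List.foldl]
    rw [hfold, ih _ _ hmax]

-- ===== VERDICT (by name: the statement is the Claim_ definition above) =====
theorem unionsinrep_spec : Claim_equal_unionsinrep := by
  intro s1 s2 _
  unfold Spec_unionsinrep unionsinrep unionsinrep_alt
  exact congrArg String.mk (pvKey _ _ _ rfl)
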